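-- pv_equiv track=rewrite | github.com/ArsonBeelzebufo/SVGDesmos | main.py | pairify
-- ===== SOURCE A (Python) =====
-- def pairify(nums):
--     res=[]
--     ans=[]
--     for num in nums:
--         ans.append(num)
--         if len(ans)==2:
--             if '-' not in ans[1]:
--                 ans[1]='-'+ans[1]
--             else:
--                 ans[1]=ans[1][1:]
--             res.append(ans[:])
--             ans=[]
--     return res
-- ===== SOURCE B (Python) =====
-- def pairify(nums):
--     # pass 1: flip sign of every odd-indexed element, position-wise
--     flipped = [s if i % 2 == 0 else ('-' + s if '-' not in s else s[1:])
--                for i, s in enumerate(nums)]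
--     # pass 2: chunk the transformed list into consecutive pairs (trailing odd element dropped)
--     return [flipped[2 * k:2 * k + 2] for k in range(len(nums) // 2)]
-- ===== Notes on version B (the rewrite author's own statement) =====
-- stated objective: alternative
-- what changed: Replaces A's single-pass buffer-and-flush accumulator with two staged passes: a position-wise map that flips every odd-indexed element via enumerate, then index-based chunking of the transformed list into consecutive pairs (flipping and pairing are decoupled).
import Mathlib
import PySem

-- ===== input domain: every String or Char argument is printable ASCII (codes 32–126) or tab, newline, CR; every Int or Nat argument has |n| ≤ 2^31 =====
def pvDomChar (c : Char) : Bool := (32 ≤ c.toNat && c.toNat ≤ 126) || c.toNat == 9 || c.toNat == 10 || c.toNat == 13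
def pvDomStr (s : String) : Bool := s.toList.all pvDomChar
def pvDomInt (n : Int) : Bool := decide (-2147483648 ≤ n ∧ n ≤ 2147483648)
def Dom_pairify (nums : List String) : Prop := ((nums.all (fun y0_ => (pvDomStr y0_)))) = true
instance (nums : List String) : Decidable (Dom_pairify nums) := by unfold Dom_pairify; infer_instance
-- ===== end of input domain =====

-- B replaces A's buffer-and-flush single pass with two staged passes (flip odd positions, then chunk into pairs); same cost, return value proved equal.

-- ===== PORT A =====
-- A's loop body: state (res, ans); append num to ans, and when len(ans) == 2 flip ans[1] and flush.
def pvStepA (st : List (List String) × List String) (num : String) :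
    List (List String) × List String :=
  let ans := st.2 ++ [num]
  if ans.length == 2 then
    let a1 := PySem.List.pyGetD ans 1 ""
    let ans := ans.set 1
      (if ! PySem.Str.isIn "-" a1 then String.ofList ('-' :: a1.toList)
       else PySem.Str.slice a1 (some 1) none)
    (st.1 ++ [ans], ([] : List String))
  else (st.1, ans)

def pairify (nums : List String) : List (List String) :=
  (nums.foldl pvStepA (([] : List (List String)), ([] : List String))).1

-- ===== PORT B =====
-- pass 1 of Source B: [s if i % 2 == 0 else flip(s) for i, s in enumerate(nums)]
def pvFlipPass (nums : List String) : List String :=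
  (PySem.List.enumerate nums 0).map (fun p =>
    if PySem.Int.mod p.1 2 == 0 then p.2
    else if ! PySem.Str.isIn "-" p.2 then String.ofList ('-' :: p.2.toList)
         else PySem.Str.slice p.2 (some 1) none)

-- pass 2 of Source B: [flipped[2*k:2*k+2] for k in range(len(nums)//2)]
def pairify_alt (nums : List String) : List (List String) :=
  let flipped := pvFlipPass nums
  (PySem.List.pyRange 0 (PySem.Int.floordiv (nums.length : Int) 2) 1).map
    (fun k => PySem.List.slice flipped (some (2 * k)) (some (2 * k + 2)))

-- ===== PRECONDITION & SPEC =====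
def Spec_pairify (nums : List String) (out : List (List String)) : Prop := out = pairify_alt nums
instance (nums : List String) (out : List (List String)) : Decidable (Spec_pairify nums out) := by unfold Spec_pairify; infer_instance

-- ===== CLAIM (what is proved, stated in full; the proofs are below) =====
def Claim_equal_pairify : Prop := ∀ (nums : List String), Dom_pairify nums → Spec_pairify nums (pairify nums)

-- ===== LEMMAS AND PROOFS =====

-- the common normal form: disjoint consecutive pairs with the second flipped
def pvFlip (b : String) : String :=
  if ! PySem.Str.isIn "-" b then String.ofList ('-' :: b.toList)
  else PySem.Str.slice b (some 1) none

def pvPaired : List String → List (List String)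
  | [] => []
  | [_] => []
  | a :: b :: rest => [a, pvFlip b] :: pvPaired rest

-- ===== A side =====
theorem pvStepA_empty (res : List (List String)) (a : String) :
    pvStepA (res, []) a = (res, [a]) := rfl

theorem pvStepA_one (res : List (List String)) (a b : String) :
    pvStepA (res, [a]) b = (res ++ [[a, pvFlip b]], ([] : List String)) := by
  simp [pvStepA, pvFlip, PySem.List.pyGetD, PySem.List.pyGet?, PySem.List.pyIdx?]

-- loop invariant: starting A's fold with accumulated result `res` and empty buffer yields res ++ the paired normal form
theorem pairify_loop_eq (nums : List String) (res : List (List String)) :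
    (nums.foldl pvStepA (res, ([] : List String))).1 = res ++ pvPaired nums := by
  induction nums using pvPaired.induct generalizing res with
  | case1 => simp [pvPaired]
  | case2 a => simp [pvPaired, List.foldl, pvStepA_empty]
  | case3 a b rest ih =>
      rw [List.foldl_cons, pvStepA_empty, List.foldl_cons, pvStepA_one, ih]
      simp [pvPaired]

-- ===== B side =====
-- the flip decision depends only on the parity of the index, so shifting the enumerate start by 2 changes nothing
theorem pvFlipPass_shift (xs : List String) (s : Int) :
    (PySem.List.enumerate xs (s + 2)).map (fun p =>
      if PySem.Int.mod p.1 2 == 0 then p.2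
      else if ! PySem.Str.isIn "-" p.2 then String.ofList ('-' :: p.2.toList)
           else PySem.Str.slice p.2 (some 1) none)
    = (PySem.List.enumerate xs s).map (fun p =>
      if PySem.Int.mod p.1 2 == 0 then p.2
      else if ! PySem.Str.isIn "-" p.2 then String.ofList ('-' :: p.2.toList)
           else PySem.Str.slice p.2 (some 1) none) := by
  induction xs generalizing s with
  | nil => simp [PySem.List.enumerate_nil]
  | cons x xs ih =>
      rw [PySem.List.enumerate_cons, PySem.List.enumerate_cons, List.map_cons, List.map_cons]
      have hmod : PySem.Int.mod (s + 2) 2 = PySem.Int.mod s 2 := by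
        rw [PySem.Int.mod_eq_emod_of_pos (by omega : (0:Int) < 2),
            PySem.Int.mod_eq_emod_of_pos (by omega : (0:Int) < 2)]
        omega
      have hs : s + 2 + 1 = s + 1 + 2 := by ring
      rw [hmod, hs, ih]

theorem pvFlipPass_cons₂ (a b : String) (rest : List String) :
    pvFlipPass (a :: b :: rest) = a :: pvFlip b :: pvFlipPass rest := by
  unfold pvFlipPass
  rw [PySem.List.enumerate_cons, PySem.List.enumerate_cons, List.map_cons, List.map_cons]
  have h2 : (0 : Int) + 1 + 1 = 0 + 2 := by ring
  rw [h2, pvFlipPass_shift]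
  simp [pvFlip]

-- chunking the flipped list by index yields the paired normal form
theorem chunks_eq (xs : List String) :
    (List.range (xs.length / 2)).map
      (fun k => (pvFlipPass xs).drop (2 * k) |>.take 2) = pvPaired xs := by
  induction xs using pvPaired.induct with
  | case1 => simp [pvPaired]
  | case2 a => simp [pvPaired]
  | case3 a b rest ih =>
      have hlen : (a :: b :: rest).length / 2 = rest.length / 2 + 1 := by
        simp [List.length_cons]; omega
      rw [hlen, List.range_succ_eq_map, List.map_cons, List.map_map]
      rw [pvFlipPass_cons₂]
      simp only [pvPaired]
      refine List.cons_eq_cons.mpr ⟨by simp, ?_⟩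
      rw [← ih]
      apply List.map_congr_left
      intro k _
      simp only [Function.comp, Nat.succ_eq_add_one]
      have h : 2 * (k + 1) = 2 * k + 1 + 1 := by ring
      rw [h, List.drop_succ_cons, List.drop_succ_cons]

theorem pairify_alt_eq (nums : List String) : pairify_alt nums = pvPaired nums := by
  unfold pairify_alt
  have hfd : PySem.Int.floordiv (nums.length : Int) 2 = ((nums.length / 2 : Nat) : Int) :=
    PySem.Int.floordiv_natCast nums.length 2
  rw [hfd, PySem.List.pyRange_zero_natCast, List.map_map, ← chunks_eq]
  apply List.map_congr_left
  intro k hk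
  simp only [Function.comp]
  have h2k : (2 : Int) * (k : Int) = ((2 * k : Nat) : Int) := by push_cast; ring
  have h2k2 : (2 : Int) * (k : Int) + 2 = ((2 * k : Nat) : Int) + ((2 : Nat) : Int) := by
    push_cast; ring
  rw [h2k2, h2k, PySem.List.slice_natCast_add]

-- ===== VERDICT (by name: the statement is the Claim_ definition above) =====
theorem pairify_spec : Claim_equal_pairify := by
  intro nums _
  show _ = _
  rw [pairify_alt_eq]
  unfold pairify
  rw [pairify_loop_eq]
  simp
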